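-- pv_equiv track=rewrite | github.com/MrBrantCode/unitest_baseline | mut_generate/mist_train_taco/taco_16149/solution.py | calculate_max_sequence_sum
-- ===== SOURCE A (Python) =====
-- def calculate_max_sequence_sum(n: int, B: int, x: int, y: int) -> int:
--     """
--     Calculate the maximum possible sum of the sequence a_0, a_1, ..., a_n
--     where a_0 = 0 and for each i >= 1, a_i can be either a_{i-1} + x or a_{i-1} - y,
--     subject to the constraint that a_i <= B for all i.
--
--     Parameters:
--     n (int): The length of the sequence.
--     B (int): The upper bound for each element in the sequence.
--     x (int): The increment value.
--     y (int): The decrement value.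
--
--     Returns:
--     int: The maximum possible sum of the sequence.
--     """
--     a = 0
--     ans = a
--     for i in range(n):
--         if a + x <= B:
--             a += x
--         else:
--             a -= y
--         ans += a
--     return ans
-- ===== SOURCE B (Python) =====
-- def calculate_max_sequence_sum(n: int, B: int, x: int, y: int) -> int:
--     """Cycle-detecting re-implementation: the next value depends only on the
--     current one, so once a value repeats the trajectory is periodic; the full
--     repetitions of the detected cycle are summed arithmetically and only the
--     transient and the remainder are simulated step by step."""
--     seen = {}
--     a = 0
--     total = 0
--     i = 0
--     while i < n:
--         if a in seen:
--             j, s = seen[a]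
--             L = i - j
--             cyc = total - s
--             full = (n - i) // L
--             total += full * cyc
--             i += full * L
--             while i < n:
--                 a = a + x if a + x <= B else a - y
--                 total += a
--                 i += 1
--             break
--         seen[a] = (i, total)
--         a = a + x if a + x <= B else a - y
--         total += a
--         i += 1
--     return total
-- ===== Notes on version B (the rewrite author's own statement) =====
-- stated objective: alternative
-- what changed: The next value depends only on the current one, so B memoizes seen states in a dict, detects the first repeated state, sums the detected cycle's full repetitions arithmetically and only simulates the transient plus the remainder, instead of A's uniform step-by-step summation loop.
import Mathlib
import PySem

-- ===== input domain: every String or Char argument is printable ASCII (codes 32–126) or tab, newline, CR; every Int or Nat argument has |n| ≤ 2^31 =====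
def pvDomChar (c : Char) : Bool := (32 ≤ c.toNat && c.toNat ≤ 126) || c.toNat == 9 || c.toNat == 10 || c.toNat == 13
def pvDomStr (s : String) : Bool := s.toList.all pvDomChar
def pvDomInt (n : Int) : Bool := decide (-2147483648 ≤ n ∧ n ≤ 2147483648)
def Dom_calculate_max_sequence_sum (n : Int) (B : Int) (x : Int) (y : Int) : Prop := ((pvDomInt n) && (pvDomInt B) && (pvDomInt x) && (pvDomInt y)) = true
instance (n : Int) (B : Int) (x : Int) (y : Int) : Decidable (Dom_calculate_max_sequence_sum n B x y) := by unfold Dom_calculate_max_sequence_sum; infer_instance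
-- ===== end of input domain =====

-- B replaces A's uniform step-by-step summation loop by cycle detection on the (deterministic)
-- state, summing a detected cycle's repetitions arithmetically (alternative algorithm; not claimed faster).


-- ===== PORT A =====
-- literal transliteration of A: a = 0; ans = a; for i in range(n): step; ans += a
def calculate_max_sequence_sum (n : Int) (B : Int) (x : Int) (y : Int) : Int :=
  (((PySem.List.pyRange 0 n 1).foldl
      (fun (st : Int × Int) _ =>
        if st.1 + x ≤ B then (st.1 + x, st.2 + (st.1 + x))
        else (st.1 - y, st.2 + (st.1 - y)))
      (0, 0)).2)

-- ===== PORT B =====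
-- the remainder loop of Source B: 'while i < n: step; total += a; i += 1' (fuel = n - i)
def pvAltTail (B x y : Int) : Nat → Int → Int → Int
  | 0, _, total => total
  | Nat.succ k, a, total =>
      let a' := if a + x ≤ B then a + x else a - y
      pvAltTail B x y k a' (total + a')

-- the main loop of Source B: dict 'seen', cycle detection, arithmetic jump (fuel = n - i)
def pvAltLoop (B x y n : Int) : Nat → PySem.Dict Int (Int × Int) → Int → Int → Int → Int
  | 0, _, _, total, _ => total
  | Nat.succ k, seen, a, total, i =>
      match seen.get? a with
      | some (j, s) =>
          let L := i - j
          let cyc := total - s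
          let full := PySem.Int.floordiv (n - i) L
          pvAltTail B x y (n - (i + full * L)).toNat a (total + full * cyc)
      | none =>
          let a' := if a + x ≤ B then a + x else a - y
          pvAltLoop B x y n k (seen.insert a (i, total)) a' (total + a') (i + 1)

def calculate_max_sequence_sum_alt (n : Int) (B : Int) (x : Int) (y : Int) : Int :=
  pvAltLoop B x y n n.toNat PySem.Dict.empty 0 0 0

-- ===== PRECONDITION & SPEC =====
def Spec_calculate_max_sequence_sum (n : Int) (B : Int) (x : Int) (y : Int) (out : Int) : Prop := out = calculate_max_sequence_sum_alt n B x y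
instance (n : Int) (B : Int) (x : Int) (y : Int) (out : Int) : Decidable (Spec_calculate_max_sequence_sum n B x y out) := by unfold Spec_calculate_max_sequence_sum; infer_instance

-- ===== CLAIM (what is proved, stated in full; the proofs are below) =====
def Claim_equal_calculate_max_sequence_sum : Prop := ∀ (n : Int) (B : Int) (x : Int) (y : Int), Dom_calculate_max_sequence_sum n B x y → Spec_calculate_max_sequence_sum n B x y (calculate_max_sequence_sum n B x y)

-- ===== LEMMAS AND PROOFS =====

-- the trajectory a_t and the prefix sums S_t of the common step function
def pvA (B x y : Int) : Nat → Int
  | 0 => 0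
  | t + 1 => let a := pvA B x y t; if a + x ≤ B then a + x else a - y

def pvS (B x y : Int) : Nat → Int
  | 0 => 0
  | t + 1 => pvS B x y t + pvA B x y (t + 1)

lemma pvAltTail_eq (B x y : Int) : ∀ (m t : Nat),
    pvAltTail B x y m (pvA B x y t) (pvS B x y t) = pvS B x y (t + m) := by
  intro m
  induction m with
  | zero => intro t; simp [pvAltTail]
  | succ k ih =>
      intro t
      have h1 : (if pvA B x y t + x ≤ B then pvA B x y t + x else pvA B x y t - y)
          = pvA B x y (t + 1) := by simp [pvA]
      have h2 : pvS B x y t + pvA B x y (t + 1) = pvS B x y (t + 1) := by simp [pvS]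
      simp only [pvAltTail, h1, h2, ih (t + 1)]
      congr 1
      omega

-- A's fold is the same iteration
lemma pvFoldA_eq (B x y : Int) : ∀ (l : List Int) (a total : Int),
    (l.foldl
      (fun (st : Int × Int) _ =>
        if st.1 + x ≤ B then (st.1 + x, st.2 + (st.1 + x))
        else (st.1 - y, st.2 + (st.1 - y)))
      (a, total)).2 = pvAltTail B x y l.length a total := by
  intro l
  induction l with
  | nil => intro a total; simp [pvAltTail]
  | cons hd tl ih =>
      intro a total
      simp only [List.foldl, List.length_cons, pvAltTail]
      by_cases h : a + x ≤ B <;> simp [h, ih]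

-- periodicity: a repeated state makes the trajectory periodic from there on
lemma pvA_periodic (B x y : Int) (j L : Nat) (hL : pvA B x y (j + L) = pvA B x y j) :
    ∀ m, pvA B x y (j + m + L) = pvA B x y (j + m) := by
  intro m
  induction m with
  | zero => simpa using hL
  | succ m ih =>
      have e1 : j + (m + 1) + L = (j + m + L) + 1 := by omega
      have e2 : j + (m + 1) = (j + m) + 1 := by omega
      rw [e1, e2]
      simp [pvA, ih]

lemma pvS_window (B x y : Int) (j L : Nat) (hL : pvA B x y (j + L) = pvA B x y j) :
    ∀ m, pvS B x y (j + m + L) - pvS B x y (j + m) = pvS B x y (j + L) - pvS B x y j := by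
  intro m
  induction m with
  | zero => simp
  | succ m ih =>
      have hA := pvA_periodic B x y j L hL (m + 1)
      have e1 : j + (m + 1) + L = (j + m + L) + 1 := by omega
      have e2 : j + (m + 1) = (j + m) + 1 := by omega
      rw [e1, e2] at hA ⊢
      simp only [pvS] at *
      omega

lemma pvS_cycles (B x y : Int) (j L : Nat) (hL : pvA B x y (j + L) = pvA B x y j)
    (t : Nat) (ht : j ≤ t) : ∀ c : Nat,
    pvS B x y (t + c * L) = pvS B x y t + (c : Int) * (pvS B x y (j + L) - pvS B x y j) := by
  intro c
  induction c with
  | zero => simp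
  | succ c ih =>
      have hw := pvS_window B x y j L hL (t - j + c * L)
      have e1 : j + (t - j + c * L) + L = t + c * L + L := by omega
      have e2 : j + (t - j + c * L) = t + c * L := by omega
      rw [e1, e2] at hw
      have e3 : t + (c + 1) * L = t + c * L + L := by rw [Nat.succ_mul]; omega
      rw [e3]
      push_cast
      nlinarith [hw, ih]

lemma pvA_periodic_mul (B x y : Int) (j L : Nat) (hL : pvA B x y (j + L) = pvA B x y j)
    (t : Nat) (ht : j ≤ t) : ∀ c : Nat, pvA B x y (t + c * L) = pvA B x y t := by
  intro c
  induction c with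
  | zero => simp
  | succ c ih =>
      have hp := pvA_periodic B x y j L hL (t - j + c * L)
      have e1 : j + (t - j + c * L) + L = t + c * L + L := by omega
      have e2 : j + (t - j + c * L) = t + c * L := by omega
      rw [e1, e2] at hp
      have e3 : t + (c + 1) * L = t + c * L + L := by rw [Nat.succ_mul]; omega
      rw [e3, hp, ih]

-- the dict invariant: every stored entry is a true (index, prefix-sum) pair of the trajectory
def pvInv (B x y : Int) (seen : PySem.Dict Int (Int × Int)) (t : Nat) : Prop :=
  ∀ a0 j s, seen.get? a0 = some (j, s) →
    ∃ tn : Nat, tn < t ∧ j = (tn : Int) ∧ pvA B x y tn = a0 ∧ pvS B x y tn = s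

lemma pvAltLoop_eq (B x y n : Int) : ∀ (k : Nat) (seen : PySem.Dict Int (Int × Int)) (t : Nat),
    pvInv B x y seen t → (n - (t : Int)).toNat = k →
    pvAltLoop B x y n k seen (pvA B x y t) (pvS B x y t) (t : Int) = pvS B x y (t + k) := by
  intro k
  induction k with
  | zero => intro seen t _ _; simp [pvAltLoop]
  | succ k ih =>
      intro seen t hinv hk
      have hnt : n - (t : Int) = (k : Int) + 1 := by omega
      rw [pvAltLoop]
      cases hget : seen.get? (pvA B x y t) with
      | none =>
          have h1 : (if pvA B x y t + x ≤ B then pvA B x y t + x else pvA B x y t - y)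
              = pvA B x y (t + 1) := by simp [pvA]
          have h2 : pvS B x y t + pvA B x y (t + 1) = pvS B x y (t + 1) := by simp [pvS]
          simp only [h1, h2]
          have hinv' : pvInv B x y (seen.insert (pvA B x y t) ((t : Int), pvS B x y t)) (t + 1) := by
            intro a0 j s hg
            rw [PySem.Dict.get?_insert] at hg
            by_cases ha : a0 = pvA B x y t
            · rw [if_pos ha] at hg
              exact ⟨t, by omega, by simp_all⟩
            · rw [if_neg ha] at hg
              obtain ⟨tn, h1, h2, h3, h4⟩ := hinv a0 j s hg
              exact ⟨tn, by omega, h2, h3, h4⟩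
          have := ih (seen.insert (pvA B x y t) ((t : Int), pvS B x y t)) (t + 1) hinv' (by push_cast; omega)
          rw [show ((t : Int) + 1) = (((t + 1 : Nat)) : Int) by push_cast; ring]
          rw [this]
          congr 1
          omega
      | some p =>
          obtain ⟨j, s⟩ := p
          obtain ⟨jn, hjt, hj, hA, hS⟩ := hinv _ _ _ hget
          -- cycle length L as a Nat
          set Ln : Nat := t - jn with hLn
          have hLpos : 0 < Ln := by omega
          have hLint : (t : Int) - j = (Ln : Int) := by rw [hj]; omega
          have hjL : jn + Ln = t := by omega
          have hper : pvA B x y (jn + Ln) = pvA B x y jn := by rw [hjL, hA]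
          -- full = (k+1) / Ln as a Nat
          have hfull : PySem.Int.floordiv (n - (t : Int)) ((t : Int) - j)
              = (((k + 1) / Ln : Nat) : Int) := by
            rw [hLint, hnt, show ((k : Int) + 1) = ((k + 1 : Nat) : Int) by push_cast; ring]
            exact PySem.Int.floordiv_natCast (k + 1) Ln
          set F : Nat := (k + 1) / Ln with hF
          have hFL : F * Ln ≤ k + 1 := Nat.div_mul_le_self _ _
          -- the remaining fuel
          have hrem : (n - ((t : Int) + (((F : Nat) : Int)) * ((t : Int) - j))).toNat
              = (k + 1) - F * Ln := by
            rw [hLint, ← Nat.cast_mul]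
            omega
          -- value after the jump
          have hAjump : pvA B x y (t + F * Ln) = pvA B x y t :=
            pvA_periodic_mul B x y jn Ln hper t (by omega) F
          have hW : pvS B x y (jn + Ln) - pvS B x y jn = pvS B x y t - s := by
            rw [hjL, hS]
          have hSjump : pvS B x y (t + F * Ln)
              = pvS B x y t + (F : Int) * (pvS B x y t - s) := by
            rw [pvS_cycles B x y jn Ln hper t (by omega) F, hW]
          simp only [hfull]
          rw [hrem]
          have := pvAltTail_eq B x y ((k + 1) - F * Ln) (t + F * Ln)
          rw [hAjump, hSjump] at this
          rw [this]
          congr 1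
          omega

-- ===== VERDICT (by name: the statement is the Claim_ definition above) =====
theorem calculate_max_sequence_sum_spec : Claim_equal_calculate_max_sequence_sum := by
  intro n B x y _
  show calculate_max_sequence_sum n B x y = calculate_max_sequence_sum_alt n B x y
  unfold calculate_max_sequence_sum calculate_max_sequence_sum_alt
  have hA0 : pvA B x y 0 = 0 := rfl
  have hS0 : pvS B x y 0 = 0 := rfl
  have hlen : (PySem.List.pyRange 0 n 1).length = n.toNat := by
    rw [PySem.List.length_pyRange_one]; omega
  have hleft := pvFoldA_eq B x y (PySem.List.pyRange 0 n 1) 0 0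
  rw [hlen] at hleft
  have htail := pvAltTail_eq B x y n.toNat 0
  rw [hA0, hS0] at htail
  have hinv0 : pvInv B x y PySem.Dict.empty 0 := by
    intro a0 j s hg
    simp [PySem.Dict.get?_empty] at hg
  have hloop := pvAltLoop_eq B x y n n.toNat PySem.Dict.empty 0 hinv0 (by simp)
  rw [hA0, hS0] at hloop
  simp only [Nat.cast_zero] at hloop
  rw [hleft, htail, hloop]
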